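-- pv_equiv track=rewrite | github.com/tipabu/tydee | server.py | valid_domain_name
-- ===== SOURCE A (Python) =====
-- import string
--
-- def valid_domain_name(name, allow_wildcard=True):
--     ld = string.ascii_letters + string.digits
--     ldh = ld + '-'
--     if isinstance(name, str):
--         name = name.split('.')
--     if allow_wildcard and name and name[0] in ('*', '**'):
--         name = name[1:]
--     return all(
--         label and all(c in ldh for c in label) and
--         label[0] in string.ascii_letters and label[-1] in ld
--         for label in name)
-- ===== SOURCE B (Python) =====
-- def valid_domain_name(name, allow_wildcard=True):
--     # Single left-to-right scan (a small DFA) instead of split('.') + per-label passes.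
--     if allow_wildcard:
--         if name in ('*', '**'):
--             return True
--         if name.startswith('*.'):
--             name = name[2:]
--         elif name.startswith('**.'):
--             name = name[3:]
--     in_label = False   # currently inside a label
--     end_ok = False     # the label may end at the current position
--     for c in name:
--         if c == '.':
--             if not end_ok:
--                 return False
--             in_label = False
--             end_ok = False
--         elif not in_label:
--             if not ('a' <= c <= 'z' or 'A' <= c <= 'Z'):
--                 return False
--             in_label = True
--             end_ok = True
--         elif 'a' <= c <= 'z' or 'A' <= c <= 'Z' or '0' <= c <= '9':
--             end_ok = True
--         elif c == '-':
--             end_ok = False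
--         else:
--             return False
--     return end_ok
-- ===== Notes on version B (the rewrite author's own statement) =====
-- stated objective: alternative
-- what changed: Replaces splitting the name into labels and making three per-label passes (truthiness, all-chars scan, first/last indexing) with a single left-to-right scan of the string driven by a two-flag DFA (in_label, end_ok), the wildcard label handled as a string prefix.
import Mathlib
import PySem

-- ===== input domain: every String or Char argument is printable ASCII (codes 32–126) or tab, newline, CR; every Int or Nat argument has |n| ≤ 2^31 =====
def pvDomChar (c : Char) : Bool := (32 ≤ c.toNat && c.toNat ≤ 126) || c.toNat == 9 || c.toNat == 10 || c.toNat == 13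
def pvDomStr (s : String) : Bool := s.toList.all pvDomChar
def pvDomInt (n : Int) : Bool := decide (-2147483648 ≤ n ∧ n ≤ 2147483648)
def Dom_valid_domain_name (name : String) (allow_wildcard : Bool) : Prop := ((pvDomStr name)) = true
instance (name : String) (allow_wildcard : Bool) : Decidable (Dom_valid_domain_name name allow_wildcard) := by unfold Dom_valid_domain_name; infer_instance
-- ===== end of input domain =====

-- B replaces A's split('.') plus three per-label passes by one left-to-right scan of the
-- string (a two-flag DFA); objective: alternative single-pass algorithm, same O(n) cost.

-- ===== PORT A =====
-- string.ascii_letters, string.digits as explicit character lists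
def pvLetters : List Char :=
  ['a','b','c','d','e','f','g','h','i','j','k','l','m','n','o','p','q','r','s','t','u','v','w','x','y','z',
   'A','B','C','D','E','F','G','H','I','J','K','L','M','N','O','P','Q','R','S','T','U','V','W','X','Y','Z']
def pvLd : List Char := pvLetters ++ ['0','1','2','3','4','5','6','7','8','9']
def pvLdh : List Char := pvLd ++ ['-']

-- the per-label conjunction inside A's all(...); single-char 'c in s' is membership
def pvLabelOk (label : List Char) : Bool :=
  !label.isEmpty &&
  label.all (fun c => pvLdh.contains c) &&
  ((PySem.List.pyGet? label 0).any fun c => pvLetters.contains c) &&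
  ((PySem.List.pyGet? label (-1)).any fun c => pvLd.contains c)

def valid_domain_name (name : String) (allow_wildcard : Bool) : Bool :=
  let labels := PySem.Chars.splitOn name.toList ['.']
  let labels :=
    if allow_wildcard && !labels.isEmpty &&
        (labels.headD [] == ['*'] || labels.headD [] == ['*', '*']) then
      PySem.List.slice labels (some 1) none
    else labels
  labels.all pvLabelOk

-- ===== PORT B =====
def pvIsLet (c : Char) : Bool :=
  (decide ('a' ≤ c) && decide (c ≤ 'z')) || (decide ('A' ≤ c) && decide (c ≤ 'Z'))
def pvIsDig (c : Char) : Bool := decide ('0' ≤ c) && decide (c ≤ '9')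

-- Source B's for-loop over the characters: state = (in_label, end_ok); early returns = false
def pvScan : List Char → Bool → Bool → Bool
  | [], _, endOk => endOk
  | c :: rest, inLabel, endOk =>
    if c = '.' then
      if endOk then pvScan rest false false else false
    else if !inLabel then
      if pvIsLet c then pvScan rest true true else false
    else if pvIsLet c || pvIsDig c then pvScan rest true true
    else if c = '-' then pvScan rest true false
    else false

def valid_domain_name_alt (name : String) (allow_wildcard : Bool) : Bool :=
  let cs := name.toList
  if allow_wildcard && (cs == ['*'] || cs == ['*', '*']) then true
  else
    let cs :=
      if allow_wildcard && PySem.Chars.startswith cs ['*', '.'] then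
        PySem.List.slice cs (some 2) none          -- name[2:]
      else if allow_wildcard && PySem.Chars.startswith cs ['*', '*', '.'] then
        PySem.List.slice cs (some 3) none          -- name[3:]
      else cs
    pvScan cs false false

-- ===== PRECONDITION & SPEC =====
def Spec_valid_domain_name (name : String) (allow_wildcard : Bool) (out : Bool) : Prop := out = valid_domain_name_alt name allow_wildcard
instance (name : String) (allow_wildcard : Bool) (out : Bool) : Decidable (Spec_valid_domain_name name allow_wildcard out) := by unfold Spec_valid_domain_name; infer_instance

-- ===== CLAIM (what is proved, stated in full; the proofs are below) =====
def Claim_equal_valid_domain_name : Prop := ∀ (name : String) (allow_wildcard : Bool), Dom_valid_domain_name name allow_wildcard → Spec_valid_domain_name name allow_wildcard (valid_domain_name name allow_wildcard)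

-- ===== LEMMAS AND PROOFS =====

-- clean structural model of str.split('.') : (first label, remaining labels)
def pvSplit : List Char → List Char × List (List Char)
  | [] => ([], [])
  | c :: t =>
    let p := pvSplit t
    if c = '.' then ([], p.1 :: p.2) else (c :: p.1, p.2)

theorem pvSplit_go (fuel : Nat) :
    ∀ (l cur : List Char) (acc : List (List Char)), l.length < fuel →
      PySem.Chars.splitOn.go ['.'] fuel l cur acc =
        acc.reverse ++ ((cur.reverse ++ (pvSplit l).1) :: (pvSplit l).2) := by
  induction fuel with
  | zero => intro l cur acc h; omega
  | succ f ih =>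
    intro l cur acc h
    match l with
    | [] => simp [PySem.Chars.splitOn.go, pvSplit]
    | c :: rest =>
      by_cases hc : c = '.'
      · subst hc
        rw [PySem.Chars.splitOn.go]
        simp only [List.isPrefixOf, beq_self_eq_true, Bool.true_and, if_pos]
        have hdrop : List.drop (['.'] : List Char).length ('.' :: rest) = rest := rfl
        rw [hdrop, ih rest [] (List.reverse cur :: acc) (by simpa using Nat.lt_of_succ_lt_succ h)]
        simp [pvSplit]
      · rw [PySem.Chars.splitOn.go]
        have hpre : (['.'].isPrefixOf (c :: rest)) = false := by
          simp only [List.isPrefixOf, Bool.and_eq_false_iff, beq_eq_false_iff_ne, ne_eq]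
          exact Or.inl fun hx => hc hx.symm
        rw [hpre]
        simp only [Bool.false_eq_true, if_false]
        rw [ih rest (c :: cur) acc (by simpa using Nat.lt_of_succ_lt_succ h)]
        simp [pvSplit, hc]

theorem splitOn_eq (cs : List Char) :
    PySem.Chars.splitOn cs ['.'] = (pvSplit cs).1 :: (pvSplit cs).2 := by
  unfold PySem.Chars.splitOn
  rw [pvSplit_go (cs.length + 1) cs [] [] (by omega)]
  simp

-- character-class bridges
theorem char_eq_iff (c d : Char) : c = d ↔ c.toNat = d.toNat := by
  constructor
  · rintro rfl; rfl
  · intro h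
    have h1 := Char.ofNat_toNat c
    have h2 := Char.ofNat_toNat d
    rw [← h1, ← h2, h]

theorem char_le_iff (c d : Char) : c ≤ d ↔ c.toNat ≤ d.toNat := Iff.rfl

theorem mem_letters (c : Char) : pvLetters.contains c = pvIsLet c := by
  rw [Bool.eq_iff_iff]
  simp only [pvLetters, pvIsLet, List.contains_eq_mem, List.mem_cons, List.not_mem_nil, or_false,
    Bool.or_eq_true, Bool.and_eq_true, decide_eq_true_eq, char_eq_iff, char_le_iff, Char.reduceToNat]
  omega

theorem mem_ld (c : Char) : pvLd.contains c = (pvIsLet c || pvIsDig c) := by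
  rw [Bool.eq_iff_iff]
  simp only [pvLd, pvLetters, pvIsLet, pvIsDig, List.contains_eq_mem, List.mem_append,
    List.mem_cons, List.not_mem_nil, or_false, Bool.or_eq_true, Bool.and_eq_true,
    decide_eq_true_eq, char_eq_iff, char_le_iff, Char.reduceToNat]
  omega

theorem mem_ldh (c : Char) : pvLdh.contains c = (pvIsLet c || pvIsDig c || c = '-') := by
  rw [Bool.eq_iff_iff]
  simp only [pvLdh, pvLd, pvLetters, pvIsLet, pvIsDig, List.contains_eq_mem, List.mem_append,
    List.mem_cons, List.not_mem_nil, or_false, Bool.or_eq_true, Bool.and_eq_true,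
    decide_eq_true_eq, decide_eq_true_iff, char_eq_iff, char_le_iff, Char.reduceToNat]
  omega

-- spec-side per-label predicates (B's DFA restricted to one label)
def pvTail : List Char → Bool → Bool
  | [], e => e
  | c :: t, _ =>
    if pvIsLet c || pvIsDig c then pvTail t true
    else if c = '-' then pvTail t false
    else false

def pvHead : List Char → Bool
  | [] => false
  | c :: t => pvIsLet c && pvTail t true

theorem pvTail_spec (t : List Char) (e : Bool) :
    pvTail t e = (t.all (fun c => pvIsLet c || pvIsDig c || c = '-') &&
      (match t.getLast? with
       | some d => pvIsLet d || pvIsDig d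
       | none => e)) := by
  induction t generalizing e with
  | nil => simp [pvTail]
  | cons c t ih =>
    rw [pvTail]
    match t with
    | [] =>
      by_cases h1 : (pvIsLet c || pvIsDig c) = true
      · simp [h1, pvTail]
      · by_cases h2 : c = '-' <;> simp_all [pvTail]
    | d :: t' =>
      obtain ⟨x, hg⟩ : ∃ x, (d :: t').getLast? = some x :=
        ⟨(d :: t').getLast (by simp), List.getLast?_eq_some_getLast (by simp)⟩
      have hl : (c :: d :: t').getLast? = (d :: t').getLast? := by
        simp [List.getLast?_cons_cons]
      rw [hl, hg]
      by_cases h1 : (pvIsLet c || pvIsDig c) = true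
      · rw [if_pos h1, ih, hg]
        simp [h1]
      · by_cases h2 : c = '-'
        · rw [if_neg h1, if_pos h2, ih, hg]
          simp only [Bool.or_eq_true, not_or, Bool.not_eq_true] at h1
          simp [h1.1, h1.2, h2]
        · rw [if_neg h1, if_neg h2]
          simp only [Bool.or_eq_true, not_or, Bool.not_eq_true] at h1
          simp [h1.1, h1.2, h2]

theorem labelOk_eq (label : List Char) : pvLabelOk label = pvHead label := by
  match label with
  | [] => simp [pvLabelOk, pvHead, PySem.List.pyGet?]
  | c :: t =>
    rw [pvLabelOk, pvHead, pvTail_spec]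
    have h0 : PySem.List.pyGet? (c :: t) 0 = some c := by
      simp [pysem]
    have h1 : PySem.List.pyGet? (c :: t) (-1) = (c :: t).getLast? := PySem.List.pyGet?_neg_one _
    rw [h0, h1]
    match t with
    | [] =>
      simp only [List.all_cons, List.all_nil, List.getLast?_singleton, Option.any_some,
        List.isEmpty_cons, Bool.not_false, Bool.true_and, Bool.and_true, mem_letters, mem_ld, mem_ldh]
      cases hL : pvIsLet c <;> cases hD : pvIsDig c <;> simp [hL, hD]
    | d :: t' =>
      have hl : (c :: d :: t').getLast? = (d :: t').getLast? := by
        simp [List.getLast?_cons_cons]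
      rw [hl]
      have hne : (d :: t').getLast? = some ((d :: t').getLast (by simp)) := by
        simp [List.getLast?_eq_getLast]
      rw [hne]
      simp only [List.all_cons, Option.any_some, List.isEmpty_cons, Bool.not_false, Bool.true_and,
        mem_letters, mem_ld, mem_ldh]
      set x := (d :: t').getLast (by simp)
      have hx : x ∈ d :: t' := List.getLast_mem _
      cases hL : pvIsLet c <;> cases hD : pvIsDig c <;>
        cases hXL : pvIsLet x <;> cases hXD : pvIsDig x <;>
          by_cases hch : c = '-' <;>
            simp_all

-- the wildcard strip: structure of cs when the first label is '*' or '**'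
theorem pvSplit_dot (t : List Char) :
    pvSplit ('.' :: t) = ([], (pvSplit t).1 :: (pvSplit t).2) := by
  simp [pvSplit]

theorem pvSplit_ne (c : Char) (t : List Char) (h : c ≠ '.') :
    pvSplit (c :: t) = (c :: (pvSplit t).1, (pvSplit t).2) := by
  simp [pvSplit, h]

theorem pvScan_spec (cs : List Char) :
    (∀ e, pvScan cs true e = (pvTail (pvSplit cs).1 e && (pvSplit cs).2.all pvHead)) ∧
    (pvScan cs false false = (pvHead (pvSplit cs).1 && (pvSplit cs).2.all pvHead)) := by
  induction cs with
  | nil => simp [pvScan, pvSplit, pvTail, pvHead]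
  | cons c t ih =>
    obtain ⟨ihT, ihF⟩ := ih
    by_cases hc : c = '.'
    · subst hc
      constructor
      · intro e
        rw [pvScan, if_pos rfl]
        cases e
        · simp [pvSplit, pvTail]
        · rw [if_pos rfl, ihF]
          simp [pvSplit, pvTail, pvHead]
      · rw [pvScan, if_pos rfl]
        simp [pvSplit, pvHead]
    · by_cases h1 : (pvIsLet c || pvIsDig c) = true
      · constructor
        · intro e
          rw [pvScan, if_neg hc]
          simp only [Bool.not_true, Bool.false_eq_true, if_false, h1, if_pos, ihT]
          simp [pvSplit, hc, pvTail, h1]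
        · rw [pvScan, if_neg hc]
          simp only [Bool.not_false, if_pos]
          cases hL : pvIsLet c
          · have hB := ihT true
            simp [hL, pvSplit, hc, pvHead]
          · rw [if_pos rfl, ihT]
            simp [pvSplit, hc, pvHead, hL]
      · have hL : pvIsLet c = false := by
          cases h : pvIsLet c <;> simp_all
        have hD : pvIsDig c = false := by
          cases h : pvIsDig c <;> simp_all
        constructor
        · intro e
          rw [pvScan, if_neg hc]
          simp only [Bool.not_true, Bool.false_eq_true, if_false, h1]
          by_cases h2 : c = '-'
          · rw [if_pos h2, ihT]
            rw [pvSplit_ne c t hc]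
            show _ = (pvTail (c :: (pvSplit t).1) e && _)
            rw [pvTail, if_neg h1, if_pos h2]
          · rw [if_neg h2, pvSplit_ne c t hc]
            show _ = (pvTail (c :: (pvSplit t).1) e && _)
            rw [pvTail, if_neg h1, if_neg h2]
            simp
        · rw [pvScan, if_neg hc]
          simp [hL, pvSplit, hc, pvHead]

theorem all_eq_all (l : List (List Char)) : l.all pvLabelOk = l.all pvHead := by
  have : pvLabelOk = pvHead := funext labelOk_eq
  rw [this]

-- which strings have first label '*' or '**'
theorem pvSplit_first (cs l : List Char) (h : (pvSplit cs).1 = l) :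
    cs = l ∨ (l ++ ['.']) <+: cs := by
  induction cs generalizing l with
  | nil =>
    simp [pvSplit] at h
    exact Or.inl h.symm
  | cons c t ih =>
    by_cases hc : c = '.'
    · subst hc
      rw [pvSplit_dot] at h
      simp at h
      subst h
      exact Or.inr ⟨t, rfl⟩
    · rw [pvSplit_ne c t hc] at h
      match l, h with
      | c :: l', h =>
        simp at h
        rcases ih l' h.2 with h' | ⟨u, hu⟩
        · exact Or.inl (by rw [h.1, h'])
        · exact Or.inr ⟨u, by rw [h.1, ← hu]; simp⟩

-- the core equivalence, on the character list
theorem main_eq (cs : List Char) (aw : Bool) :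
    ((if (aw && !(PySem.Chars.splitOn cs ['.']).isEmpty &&
          ((PySem.Chars.splitOn cs ['.']).headD [] == ['*'] ||
           (PySem.Chars.splitOn cs ['.']).headD [] == ['*', '*'])) = true then
        PySem.List.slice (PySem.Chars.splitOn cs ['.']) (some 1) none
      else PySem.Chars.splitOn cs ['.']).all pvLabelOk) =
    (if (aw && (cs == ['*'] || cs == ['*', '*'])) = true then true
     else
       pvScan
         (if (aw && PySem.Chars.startswith cs ['*', '.']) = true then PySem.List.slice cs (some 2) none
          else if (aw && PySem.Chars.startswith cs ['*', '*', '.']) = true then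
            PySem.List.slice cs (some 3) none
          else cs)
         false false) := by
  rw [splitOn_eq]
  cases aw with
  | false =>
    simp only [Bool.false_and, Bool.false_eq_true, if_false, all_eq_all]
    rw [(pvScan_spec cs).2]
    simp
  | true =>
    simp only [Bool.true_and, List.isEmpty_cons, Bool.not_false, Bool.true_and, List.headD_cons]
    by_cases h1 : cs = ['*'] ∨ cs = ['*', '*']
    · rcases h1 with rfl | rfl <;> decide
    · rw [not_or] at h1
      have hne1 : (cs == ['*']) = false := by simp [h1.1]
      have hne2 : (cs == ['*', '*']) = false := by simp [h1.2]
      rw [hne1, hne2]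
      simp only [Bool.or_false, Bool.false_eq_true, if_false]
      by_cases hp1 : (['*', '.'] : List Char) <+: cs
      · obtain ⟨t, rfl⟩ := hp1
        simp only [List.cons_append, List.nil_append]
        have hsw : PySem.Chars.startswith ('*' :: '.' :: t) ['*', '.'] = true := by
          simp [PySem.Chars.startswith, List.isPrefixOf]
        rw [hsw]
        simp only [Bool.true_and, if_true]
        have hslice : PySem.List.slice ('*' :: '.' :: t) (some 2) none = t := by
          rw [PySem.List.slice_from _ (by norm_num)]
          rfl
        rw [hslice]
        have hsp : pvSplit ('*' :: '.' :: t) = (['*'], (pvSplit t).1 :: (pvSplit t).2) := by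
          rw [pvSplit_ne '*' ('.' :: t) (by decide), pvSplit_dot]
        rw [hsp]
        simp only [BEq.rfl, Bool.true_or, if_true]
        rw [PySem.List.slice_from_one, List.tail_cons, all_eq_all, (pvScan_spec t).2,
          List.all_cons]
      · by_cases hp2 : (['*', '*', '.'] : List Char) <+: cs
        · obtain ⟨t, rfl⟩ := hp2
          simp only [List.cons_append, List.nil_append]
          have hsw1 : PySem.Chars.startswith ('*' :: '*' :: '.' :: t) ['*', '.'] = false := by
            simp [PySem.Chars.startswith, List.isPrefixOf]
          have hsw2 : PySem.Chars.startswith ('*' :: '*' :: '.' :: t) ['*', '*', '.'] = true := by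
            simp [PySem.Chars.startswith, List.isPrefixOf]
          rw [hsw1, hsw2]
          simp only [Bool.false_eq_true, if_false, if_true]
          have hslice : PySem.List.slice ('*' :: '*' :: '.' :: t) (some 3) none = t := by
            rw [PySem.List.slice_from _ (by norm_num)]
            rfl
          rw [hslice]
          have hsp : pvSplit ('*' :: '*' :: '.' :: t) =
              (['*', '*'], (pvSplit t).1 :: (pvSplit t).2) := by
            rw [pvSplit_ne '*' ('*' :: '.' :: t) (by decide),
              pvSplit_ne '*' ('.' :: t) (by decide), pvSplit_dot]
          rw [hsp]
          simp only [BEq.rfl, Bool.or_true, if_true]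
          rw [PySem.List.slice_from_one, List.tail_cons, all_eq_all, (pvScan_spec t).2,
          List.all_cons]
        · have hsw1 : PySem.Chars.startswith cs ['*', '.'] = false := by
            cases h : PySem.Chars.startswith cs ['*', '.']
            · rfl
            · exact absurd (by simpa [PySem.Chars.startswith, List.isPrefixOf_iff_prefix] using h) hp1
          have hsw2 : PySem.Chars.startswith cs ['*', '*', '.'] = false := by
            cases h : PySem.Chars.startswith cs ['*', '*', '.']
            · rfl
            · exact absurd (by simpa [PySem.Chars.startswith, List.isPrefixOf_iff_prefix] using h) hp2
          rw [hsw1, hsw2]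
          have hh1 : ¬((pvSplit cs).1 = ['*'] ∨ (pvSplit cs).1 = ['*', '*']) := by
            rintro (h | h)
            · rcases pvSplit_first cs ['*'] h with h' | h'
              · exact h1.1 h'
              · exact hp1 h'
            · rcases pvSplit_first cs ['*', '*'] h with h' | h'
              · exact h1.2 h'
              · exact hp2 h'
          have hcond : (((pvSplit cs).1 == ['*']) || ((pvSplit cs).1 == ['*', '*'])) = false := by
            simp only [Bool.or_eq_false_iff, beq_eq_false_iff_ne, ne_eq]
            exact ⟨fun h => hh1 (Or.inl h), fun h => hh1 (Or.inr h)⟩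
          rw [hcond]
          simp only [Bool.false_eq_true, if_false]
          rw [all_eq_all, (pvScan_spec cs).2, List.all_cons]

-- ===== VERDICT (by name: the statement is the Claim_ definition above) =====
theorem valid_domain_name_spec : Claim_equal_valid_domain_name := by
  intro name aw _
  unfold Spec_valid_domain_name valid_domain_name valid_domain_name_alt
  dsimp only
  exact main_eq name.toList aw
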